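-- pv_equiv track=rewrite | github.com/maxmeiselwork/STP-Track-Tool | plan_merge.py | parse_plan_for_merge
-- ===== SOURCE A (Python) =====
-- def parse_plan_for_merge(file_content):
--     """Parse plan file and extract gateway data."""
--     try:
--         lines = file_content.strip().split('\n')
--
--         if len(lines) < 3:
--             raise ValueError("Invalid plan file format - insufficient lines")
--
--         # Process tracks by gateway
--         gateways = {}
--         current_gateway = None
--
--         for line in lines[2:]:
--             line = line.strip()
--             if not line:
--                 continue
--
--             # Check if this is a gateway line
--             if line.startswith('GS_'):
--                 current_gateway = line
--                 gateways[current_gateway] = []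
--             else:
--                 # This is a track line
--                 if current_gateway:
--                     gateways[current_gateway].append(line)
--
--         return gateways
--     except Exception as e:
--         raise ValueError(f"Error parsing plan file: {str(e)}")
-- ===== SOURCE B (Python) =====
-- def parse_plan_for_merge(file_content):
--     """Parse plan file and extract gateway data (block-slicing decomposition)."""
--     try:
--         lines = file_content.strip().split('\n')
--         if len(lines) < 3:
--             raise ValueError("Invalid plan file format - insufficient lines")
--         entries = [s for s in (l.strip() for l in lines[2:]) if s]
--         gateways = {}
--         i, n = 0, len(entries)
--         while i < n:
--             if entries[i].startswith('GS_'):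
--                 j = i + 1
--                 while j < n and not entries[j].startswith('GS_'):
--                     j += 1
--                 gateways[entries[i]] = entries[i + 1:j]
--                 i = j
--             else:
--                 i += 1
--         return gateways
--     except Exception as e:
--         raise ValueError(f"Error parsing plan file: {str(e)}")
-- ===== Notes on version B (the rewrite author's own statement) =====
-- stated objective: alternative
-- what changed: A's single stateful pass tracking current_gateway and appending tracks into the dict is replaced by a block-slicing pass: strip/filter the relevant lines once, then for each gateway entry take the contiguous run of following non-gateway entries as its track list.
import Mathlib
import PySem

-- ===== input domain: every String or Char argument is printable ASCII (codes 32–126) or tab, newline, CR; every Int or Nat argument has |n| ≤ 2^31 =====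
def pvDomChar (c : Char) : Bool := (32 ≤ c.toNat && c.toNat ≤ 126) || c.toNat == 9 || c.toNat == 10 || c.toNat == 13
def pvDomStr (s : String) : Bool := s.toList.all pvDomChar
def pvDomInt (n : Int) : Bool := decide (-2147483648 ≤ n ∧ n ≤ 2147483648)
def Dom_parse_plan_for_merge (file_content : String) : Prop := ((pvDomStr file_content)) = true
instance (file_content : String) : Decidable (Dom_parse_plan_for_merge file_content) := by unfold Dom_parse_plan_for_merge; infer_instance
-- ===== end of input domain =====

-- B replaces A's stateful current-gateway loop by a block-slicing pass (each gateway takes the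
-- contiguous run of track lines after it); same cost, different decomposition ("alternative").

-- ===== PORT A =====
-- loop body of A's 'for line in lines[2:]': state = (gateways dict, current_gateway)
def pvAStep (st : PySem.Dict String (List String) × Option String) (line : String) :
    PySem.Dict String (List String) × Option String :=
  let l := PySem.Str.strip line
  if l = "" then st
  else if PySem.Str.startswith l "GS_" then (st.1.insert l [], some l)
  else
    match st.2 with
    | some g => (st.1.modify g [] (fun v => v ++ [l]), st.2)  -- gateways[current_gateway].append(line); key always present
    | none => st

def parse_plan_for_merge (file_content : String) : List (String × List String) :=
  -- '\n' ≠ "" so split? is always some; getD [] is exact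
  let lines := (PySem.Str.split? (PySem.Str.strip file_content) "\n").getD []
  ((PySem.List.slice lines (some 2) none).foldl pvAStep (PySem.Dict.empty, none)).1.items

-- ===== PORT B =====
-- B's inner 'while j < n and not entries[j].startswith("GS_")' index scan and the slice
-- entries[i+1:j] are exactly takeWhile/dropWhile of the non-gateway predicate.
def pvAltLoop (d : PySem.Dict String (List String)) : List String → PySem.Dict String (List String)
  | [] => d
  | e :: rest =>
    if PySem.Str.startswith e "GS_" then
      pvAltLoop (d.insert e (rest.takeWhile (fun x => !PySem.Str.startswith x "GS_")))
        (rest.dropWhile (fun x => !PySem.Str.startswith x "GS_"))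
    else pvAltLoop d rest
termination_by es => es.length
decreasing_by
  · simp only [List.length_cons]
    exact Nat.lt_succ_of_le (List.length_dropWhile_le _ _)
  · simp

def parse_plan_for_merge_alt (file_content : String) : List (String × List String) :=
  let lines := (PySem.Str.split? (PySem.Str.strip file_content) "\n").getD []
  let entries := (PySem.List.slice lines (some 2) none).filterMap
    (fun l => let s := PySem.Str.strip l; if s = "" then none else some s)
  (pvAltLoop PySem.Dict.empty entries).items

-- ===== PRECONDITION & SPEC =====
-- Pre_ excludes exactly the inputs with fewer than 3 lines after strip/split, where A raises
-- ValueError("Error parsing plan file: Invalid plan file format - insufficient lines") (B raises the same).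
def Pre_parse_plan_for_merge (file_content : String) : Prop :=
  3 ≤ ((PySem.Str.split? (PySem.Str.strip file_content) "\n").getD []).length
instance (file_content : String) : Decidable (Pre_parse_plan_for_merge file_content) := by
  unfold Pre_parse_plan_for_merge; infer_instance

def pvWitness_parse_plan_for_merge : String := "header\nmeta\nGS_1\ntrack one\ntrack two"

def Spec_parse_plan_for_merge (file_content : String) (out : List (String × List String)) : Prop :=
  out = parse_plan_for_merge_alt file_content
instance (file_content : String) (out : List (String × List String)) :
    Decidable (Spec_parse_plan_for_merge file_content out) := by
  unfold Spec_parse_plan_for_merge; infer_instance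

-- ===== CLAIM (what is proved, stated in full; the proofs are below) =====
def Claim_equal_parse_plan_for_merge : Prop := ∀ (file_content : String), Dom_parse_plan_for_merge file_content → Pre_parse_plan_for_merge file_content → Spec_parse_plan_for_merge file_content (parse_plan_for_merge file_content)

-- ===== LEMMAS AND PROOFS =====

-- A's loop body on an already-stripped nonempty entry
def pvEStep (st : PySem.Dict String (List String) × Option String) (e : String) :
    PySem.Dict String (List String) × Option String :=
  if PySem.Str.startswith e "GS_" then (st.1.insert e [], some e)
  else
    match st.2 with
    | some g => (st.1.modify g [] (fun v => v ++ [e]), st.2)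
    | none => st

def pvEntries (ls : List String) : List String :=
  ls.filterMap (fun l => let s := PySem.Str.strip l; if s = "" then none else some s)

-- stripping/skipping in A's loop = looping over the stripped nonempty entries
theorem pvFoldA_eq_foldE (ls : List String) (st : PySem.Dict String (List String) × Option String) :
    ls.foldl pvAStep st = (pvEntries ls).foldl pvEStep st := by
  induction ls generalizing st with
  | nil => rfl
  | cons l t ih =>
    simp only [pvEntries, List.filterMap_cons, List.foldl_cons]
    by_cases h : PySem.Str.strip l = ""
    · simp only [h, pvAStep, ih, pvEntries, if_true]
    · simp only [if_neg h, List.foldl_cons, ih, pvEntries]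
      congr 1
      simp only [pvAStep, pvEStep, if_neg h]

theorem pvModify_insert (d : PySem.Dict String (List String)) (g : String)
    (acc : List String) (f : List String → List String) :
    (d.insert g acc).modify g [] f = d.insert g (f acc) := by
  simp [PySem.Dict.modify, PySem.Dict.getD_insert_self, PySem.Dict.insert_insert_self]

-- while current_gateway = g, A appends each non-gateway entry to the entry of g
theorem pvAppendPhase (ts : List String) (hts : ∀ t ∈ ts, PySem.Str.startswith t "GS_" = false) :
    ∀ (tl : List String) (d : PySem.Dict String (List String)) (g : String) (acc : List String),
      (ts ++ tl).foldl pvEStep (d.insert g acc, some g)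
        = tl.foldl pvEStep (d.insert g (acc ++ ts), some g) := by
  induction ts with
  | nil => intro tl d g acc; simp
  | cons t ts' ih =>
    intro tl d g acc
    have ht : PySem.Str.startswith t "GS_" = false := hts t (by simp)
    have hts' : ∀ x ∈ ts', PySem.Str.startswith x "GS_" = false :=
      fun x hx => hts x (by simp [hx])
    simp only [List.cons_append, List.foldl_cons, pvEStep, ht, Bool.false_eq_true, if_false,
      pvModify_insert]
    rw [ih hts' tl d g (acc ++ [t])]
    simp

-- when the next entry is a gateway (or there is none), the current gateway is irrelevant
theorem pvCurIrrelevant (tl : List String)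
    (h : tl = [] ∨ ∃ g' r, tl = g' :: r ∧ PySem.Str.startswith g' "GS_" = true)
    (d : PySem.Dict String (List String)) (g : String) :
    (tl.foldl pvEStep (d, some g)).1 = (tl.foldl pvEStep (d, none)).1 := by
  rcases h with h | ⟨g', r, rfl, hg'⟩
  · simp [h]
  · simp only [List.foldl_cons, pvEStep, hg', if_true]

theorem pvMain (n : Nat) : ∀ (es : List String), es.length ≤ n →
    ∀ (d : PySem.Dict String (List String)),
      (es.foldl pvEStep (d, none)).1 = pvAltLoop d es := by
  induction n with
  | zero =>
    intro es hes d
    have : es = [] := List.eq_nil_of_length_eq_zero (Nat.le_zero.mp hes)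
    subst this; simp [pvAltLoop]
  | succ n ih =>
    intro es hes d
    match es with
    | [] => simp [pvAltLoop]
    | e :: rest =>
      have hrest : rest.length ≤ n := by
        simpa using Nat.le_of_succ_le_succ (by simpa using hes)
      by_cases he : PySem.Str.startswith e "GS_" = true
      · rw [pvAltLoop, if_pos he]
        simp only [List.foldl_cons, pvEStep, he, if_true]
        set p : String → Bool := fun x => !PySem.Str.startswith x "GS_" with hp
        have hsplit : rest.takeWhile p ++ rest.dropWhile p = rest :=
          List.takeWhile_append_dropWhile
        have hall : ∀ t ∈ rest.takeWhile p, PySem.Str.startswith t "GS_" = false := by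
          intro t hti
          have := List.mem_takeWhile_imp hti
          simpa [hp] using this
        conv_lhs => rw [← hsplit]
        rw [pvAppendPhase _ hall _ d e []]
        have hshape : rest.dropWhile p = [] ∨
            ∃ g' r, rest.dropWhile p = g' :: r ∧ PySem.Str.startswith g' "GS_" = true := by
          cases hdw : rest.dropWhile p with
          | nil => exact Or.inl rfl
          | cons g' r =>
            refine Or.inr ⟨g', r, rfl, ?_⟩
            have hne : rest.dropWhile p ≠ [] := by simp [hdw]
            have h2 := List.head_dropWhile_not p hne
            have hx : (rest.dropWhile p).head hne = g' := by simp [hdw]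
            rw [hx, hp, Bool.not_eq_false'] at h2
            exact h2
        rw [List.nil_append]
        rw [pvCurIrrelevant _ hshape]
        exact ih _ (Nat.le_trans (List.length_dropWhile_le p rest) hrest) _
      · rw [pvAltLoop, if_neg he]
        have hstep : pvEStep (d, none) e = (d, none) := by
          unfold pvEStep; rw [if_neg he]
        rw [List.foldl_cons, hstep]
        exact ih _ hrest _

-- ===== VERDICT (by name: the statement is the Claim_ definition above) =====
theorem parse_plan_for_merge_spec : Claim_equal_parse_plan_for_merge := by
  intro fc _ _
  unfold Spec_parse_plan_for_merge parse_plan_for_merge parse_plan_for_merge_alt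
  simp only [pvFoldA_eq_foldE]
  rw [pvMain ((pvEntries _).length) _ (Nat.le_refl _)]
  rfl
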